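-- pv_equiv track=rewrite | github.com/YiquanXiao/Revised-Connect4 | Revised Connect 4/agents.py | op_ed_streak2
-- ===== SOURCE A (Python) =====
-- def op_ed_streak2(lst):
--     """Calculate the number of open-ended 2-in-a-row for player1 and player2 in the lst.
--
--     Args:
--         lst: list that represent a row/column/diagonal of the game board
--
--     Returns: a tuple that contains the number of open-ended 2-in-a-row for player1 and player2 in the lst
--     """
--     # TODO:
--     # if the length of the list have less than 3 elements, then we won't have open-ended 2-in-a-row
--     if len(lst) < 3:
--         result = (0, 0)
--         return result
--
--     # counters for p1 and p2
--     p1_streaks = 0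
--     p2_streaks = 0
--     # record previous ceil & current streak length
--     prev = lst[0]
--     curr_len = 1
--     for curr in lst[1:]:
--         if curr == 0:  # current cell is empty
--             # update p1/p2 counters only if we have streak length > 1 and prev is not empty
--             if curr_len > 1:
--                 if prev == 1:
--                     p1_streaks += 1
--                 elif prev == -1:
--                     p2_streaks += 1
--         if curr == prev:  # current cell is the same as the previous one
--             curr_len += 1
--         else:
--             prev = curr
--             curr_len = 1
--     result = (p1_streaks, p2_streaks)
--     return result
-- ===== SOURCE B (Python) =====
-- def op_ed_streak2(lst):
--     """Count open-ended 2-in-a-rows: compress the line into runs of equal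
--     cells, then count each player run of length >= 2 that is immediately
--     followed by an empty cell."""
--     if not lst:
--         return (0, 0)
--     runs = []
--     v, n = lst[0], 1
--     for x in lst[1:]:
--         if x == v:
--             n += 1
--         else:
--             runs.append((v, n))
--             v, n = x, 1
--     runs.append((v, n))
--     p1 = 0
--     p2 = 0
--     for (rv, rn), (nv, _) in zip(runs, runs[1:]):
--         if rn >= 2 and nv == 0:
--             if rv == 1:
--                 p1 += 1
--             elif rv == -1:
--                 p2 += 1
--     return (p1, p2)
-- ===== Notes on version B (the rewrite author's own statement) =====
-- stated objective: alternative
-- what changed: B replaces A's single stateful pass (tracking prev cell and running streak length, incrementing counters when a 0 is met) by run-length compression of the line into (value, length) runs followed by a scan over consecutive run pairs counting player runs of length >= 2 followed by a zero run; the len<3 guard disappears since no qualifying pattern fits in fewer than 3 cells.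
import Mathlib
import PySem

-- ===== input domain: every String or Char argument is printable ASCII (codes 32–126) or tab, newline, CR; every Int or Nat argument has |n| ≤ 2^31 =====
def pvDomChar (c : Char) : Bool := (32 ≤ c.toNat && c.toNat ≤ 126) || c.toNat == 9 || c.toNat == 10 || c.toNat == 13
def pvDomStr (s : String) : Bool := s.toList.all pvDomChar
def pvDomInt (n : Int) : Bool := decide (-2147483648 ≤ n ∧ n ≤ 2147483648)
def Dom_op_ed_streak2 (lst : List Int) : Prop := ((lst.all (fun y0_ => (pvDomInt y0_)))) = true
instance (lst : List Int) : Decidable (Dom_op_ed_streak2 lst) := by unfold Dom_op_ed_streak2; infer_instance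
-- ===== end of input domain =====

-- B: run-length compress the line, then count player runs of length ≥ 2 followed by a zero run
-- (alternative decomposition of A's single stateful pass; same O(n) cost).

-- ===== PORT A =====
def op_ed_streak2 (lst : List Int) : Int × Int :=
  if lst.length < 3 then (0, 0)
  else
    match lst with
    | [] => (0, 0)  -- unreachable (length ≥ 3)
    | h :: t =>
      -- state: (p1_streaks, p2_streaks, prev, curr_len), folded over lst[1:]
      let s := t.foldl (fun (st : Int × Int × Int × Int) curr =>
        let p1 := st.1; let p2 := st.2.1; let prev := st.2.2.1; let len := st.2.2.2
        let q : Int × Int :=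
          if curr = 0 ∧ len > 1 then
            (if prev = 1 then (p1 + 1, p2) else if prev = -1 then (p1, p2 + 1) else (p1, p2))
          else (p1, p2)
        if curr = prev then (q.1, q.2, prev, len + 1) else (q.1, q.2, curr, 1))
        (0, 0, h, 1)
      (s.1, s.2.1)

-- ===== PORT B =====
def op_ed_streak2_alt (lst : List Int) : Int × Int :=
  match lst with
  | [] => (0, 0)
  | h :: t =>
    -- first pass: compress into runs of (value, length)
    let st := t.foldl (fun (st : List (Int × Int) × Int × Int) x =>
        let runs := st.1; let v := st.2.1; let n := st.2.2
        if x = v then (runs, v, n + 1) else (runs ++ [(v, n)], x, 1)) ([], h, 1)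
    let runs := st.1 ++ [(st.2.1, st.2.2)]
    -- second pass: scan consecutive run pairs
    (runs.zip runs.tail).foldl (fun (pq : Int × Int) pr =>
        if pr.1.2 ≥ 2 ∧ pr.2.1 = 0 then
          (if pr.1.1 = 1 then (pq.1 + 1, pq.2)
           else if pr.1.1 = -1 then (pq.1, pq.2 + 1) else pq)
        else pq) (0, 0)

-- ===== PRECONDITION & SPEC =====
def Spec_op_ed_streak2 (lst : List Int) (out : Int × Int) : Prop := out = op_ed_streak2_alt lst
instance (lst : List Int) (out : Int × Int) : Decidable (Spec_op_ed_streak2 lst out) := by unfold Spec_op_ed_streak2; infer_instance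

-- ===== CLAIM (what is proved, stated in full; the proofs are below) =====
def Claim_equal_op_ed_streak2 : Prop := ∀ (lst : List Int), Dom_op_ed_streak2 lst → Spec_op_ed_streak2 lst (op_ed_streak2 lst)

-- ===== LEMMAS AND PROOFS =====

-- recursive form of A's loop
def loopA (p1 p2 prev len : Int) : List Int → Int × Int
  | [] => (p1, p2)
  | c :: rest =>
    let q : Int × Int :=
      if c = 0 ∧ len > 1 then
        (if prev = 1 then (p1 + 1, p2) else if prev = -1 then (p1, p2 + 1) else (p1, p2))
      else (p1, p2)
    if c = prev then loopA q.1 q.2 prev (len + 1) rest else loopA q.1 q.2 c 1 rest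

-- recursive form of B's run compression
def runsAux (v n : Int) : List Int → List (Int × Int)
  | [] => [(v, n)]
  | x :: rest => if x = v then runsAux v (n + 1) rest else (v, n) :: runsAux x 1 rest

-- the contribution of one adjacent run pair
def inc (pr : (Int × Int) × (Int × Int)) : Int × Int :=
  if pr.1.2 ≥ 2 ∧ pr.2.1 = 0 then
    (if pr.1.1 = 1 then (1, 0) else if pr.1.1 = -1 then (0, 1) else (0, 0))
  else (0, 0)

def score (rs : List (Int × Int)) : Int × Int := ((rs.zip rs.tail).map inc).sum

theorem runsAux_head (rest : List Int) : ∀ (v n : Int),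
    ∃ m rs', runsAux v n rest = (v, m) :: rs' := by
  induction rest with
  | nil => intro v n; exact ⟨n, [], rfl⟩
  | cons x rest ih =>
    intro v n
    by_cases h : x = v
    · obtain ⟨m, rs', hm⟩ := ih v (n + 1)
      exact ⟨m, rs', by simp [runsAux, h, hm]⟩
    · exact ⟨n, runsAux x 1 rest, by simp [runsAux, h]⟩

theorem score_cons (a b : Int × Int) (rs : List (Int × Int)) :
    score (a :: b :: rs) = inc (a, b) + score (b :: rs) := by
  simp [score, List.zip]

theorem loopA_eq_score (rest : List Int) : ∀ (p1 p2 prev len : Int),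
    loopA p1 p2 prev len rest = (p1, p2) + score (runsAux prev len rest) := by
  induction rest with
  | nil => intro p1 p2 prev len; simp [loopA, runsAux, score]
  | cons c rest ih =>
    intro p1 p2 prev len
    by_cases hc : c = prev
    · subst hc
      have hq : (if c = 0 ∧ len > 1 then
            (if c = 1 then (p1 + 1, p2) else if c = -1 then (p1, p2 + 1) else (p1, p2))
          else (p1, p2)) = (p1, p2) := by
        split_ifs with h1 h2 h3 <;> first | rfl | (exfalso; omega)
      simp [loopA, runsAux, hq, ih]
    · obtain ⟨m, rs', hm⟩ := runsAux_head rest c 1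
      have hsc : score ((prev, len) :: runsAux c 1 rest)
          = inc ((prev, len), (c, m)) + score (runsAux c 1 rest) := by
        rw [hm]; exact score_cons _ _ _
      have hq : (if c = 0 ∧ len > 1 then
            (if prev = 1 then (p1 + 1, p2) else if prev = -1 then (p1, p2 + 1) else (p1, p2))
          else (p1, p2)) = (p1, p2) + inc ((prev, len), (c, m)) := by
        simp only [inc]
        split_ifs <;> (first | (exfalso; omega) | simp [Prod.ext_iff] | rfl) <;> omega
      simp only [loopA, if_neg hc, hq, ih, runsAux, hsc]
      simp [Prod.ext_iff, add_assoc]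

theorem foldl_runs (rest : List Int) : ∀ (acc : List (Int × Int)) (v n : Int),
    (rest.foldl (fun (st : List (Int × Int) × Int × Int) x =>
        if x = st.2.1 then (st.1, st.2.1, st.2.2 + 1) else (st.1 ++ [(st.2.1, st.2.2)], x, 1))
      (acc, v, n)).1
    ++ [((rest.foldl (fun (st : List (Int × Int) × Int × Int) x =>
        if x = st.2.1 then (st.1, st.2.1, st.2.2 + 1) else (st.1 ++ [(st.2.1, st.2.2)], x, 1))
      (acc, v, n)).2.1,
        (rest.foldl (fun (st : List (Int × Int) × Int × Int) x =>
        if x = st.2.1 then (st.1, st.2.1, st.2.2 + 1) else (st.1 ++ [(st.2.1, st.2.2)], x, 1))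
      (acc, v, n)).2.2)] = acc ++ runsAux v n rest := by
  induction rest with
  | nil => intro acc v n; simp [runsAux]
  | cons x rest ih =>
    intro acc v n
    by_cases h : x = v
    · simpa [List.foldl, h, runsAux] using ih acc v (n + 1)
    · simpa [List.foldl, h, runsAux] using ih (acc ++ [(v, n)]) x 1

theorem foldl_score (l : List ((Int × Int) × (Int × Int))) : ∀ (pq : Int × Int),
    l.foldl (fun (pq : Int × Int) pr =>
        if pr.1.2 ≥ 2 ∧ pr.2.1 = 0 then
          (if pr.1.1 = 1 then (pq.1 + 1, pq.2)
           else if pr.1.1 = -1 then (pq.1, pq.2 + 1) else pq)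
        else pq) pq = pq + (l.map inc).sum := by
  induction l with
  | nil => intro pq; simp
  | cons pr l ih =>
    intro pq
    have hstep : (if pr.1.2 ≥ 2 ∧ pr.2.1 = 0 then
          (if pr.1.1 = 1 then (pq.1 + 1, pq.2)
           else if pr.1.1 = -1 then (pq.1, pq.2 + 1) else pq)
        else pq) = pq + inc pr := by
      simp only [inc]; split_ifs <;> simp [Prod.ext_iff]
    simp only [List.foldl, List.map, List.sum_cons, hstep, ih, add_assoc]

theorem loopA_foldl (rest : List Int) : ∀ (p1 p2 prev len : Int),
    ((rest.foldl (fun (st : Int × Int × Int × Int) curr =>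
        if curr = st.2.2.1 then
          ((if curr = 0 ∧ st.2.2.2 > 1 then
            (if st.2.2.1 = 1 then (st.1 + 1, st.2.1)
             else if st.2.2.1 = -1 then (st.1, st.2.1 + 1) else (st.1, st.2.1))
          else (st.1, st.2.1)).1,
          (if curr = 0 ∧ st.2.2.2 > 1 then
            (if st.2.2.1 = 1 then (st.1 + 1, st.2.1)
             else if st.2.2.1 = -1 then (st.1, st.2.1 + 1) else (st.1, st.2.1))
          else (st.1, st.2.1)).2, st.2.2.1, st.2.2.2 + 1)
        else
          ((if curr = 0 ∧ st.2.2.2 > 1 then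
            (if st.2.2.1 = 1 then (st.1 + 1, st.2.1)
             else if st.2.2.1 = -1 then (st.1, st.2.1 + 1) else (st.1, st.2.1))
          else (st.1, st.2.1)).1,
          (if curr = 0 ∧ st.2.2.2 > 1 then
            (if st.2.2.1 = 1 then (st.1 + 1, st.2.1)
             else if st.2.2.1 = -1 then (st.1, st.2.1 + 1) else (st.1, st.2.1))
          else (st.1, st.2.1)).2, curr, 1))
      (p1, p2, prev, len)).1,
     (rest.foldl (fun (st : Int × Int × Int × Int) curr =>
        if curr = st.2.2.1 then
          ((if curr = 0 ∧ st.2.2.2 > 1 then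
            (if st.2.2.1 = 1 then (st.1 + 1, st.2.1)
             else if st.2.2.1 = -1 then (st.1, st.2.1 + 1) else (st.1, st.2.1))
          else (st.1, st.2.1)).1,
          (if curr = 0 ∧ st.2.2.2 > 1 then
            (if st.2.2.1 = 1 then (st.1 + 1, st.2.1)
             else if st.2.2.1 = -1 then (st.1, st.2.1 + 1) else (st.1, st.2.1))
          else (st.1, st.2.1)).2, st.2.2.1, st.2.2.2 + 1)
        else
          ((if curr = 0 ∧ st.2.2.2 > 1 then
            (if st.2.2.1 = 1 then (st.1 + 1, st.2.1)
             else if st.2.2.1 = -1 then (st.1, st.2.1 + 1) else (st.1, st.2.1))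
          else (st.1, st.2.1)).1,
          (if curr = 0 ∧ st.2.2.2 > 1 then
            (if st.2.2.1 = 1 then (st.1 + 1, st.2.1)
             else if st.2.2.1 = -1 then (st.1, st.2.1 + 1) else (st.1, st.2.1))
          else (st.1, st.2.1)).2, curr, 1))
      (p1, p2, prev, len)).2.1) = loopA p1 p2 prev len rest := by
  induction rest with
  | nil => intro p1 p2 prev len; simp [loopA]
  | cons c rest ih =>
    intro p1 p2 prev len
    by_cases hc : c = prev <;> simp only [List.foldl, loopA, hc, if_pos] <;>
      simp [ih]

theorem alt_eq (h : Int) (t : List Int) :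
    op_ed_streak2_alt (h :: t) = score (runsAux h 1 t) := by
  simp only [op_ed_streak2_alt]
  rw [foldl_score, foldl_runs t [] h 1]
  simp [score]

theorem a_eq (h : Int) (t : List Int) (hlen : ¬ (h :: t).length < 3) :
    op_ed_streak2 (h :: t) = loopA 0 0 h 1 t := by
  simp only [op_ed_streak2, if_neg (by exact_mod_cast hlen)]
  exact loopA_foldl t 0 0 h 1

theorem score_small (h : Int) (t : List Int) (ht : t.length < 2) :
    score (runsAux h 1 t) = (0, 0) := by
  match t, ht with
  | [], _ => simp [runsAux, score, Prod.mk_zero_zero]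
  | [b], _ =>
    by_cases hb : b = h <;>
      simp [runsAux, hb, score, List.zip, inc, Prod.mk_zero_zero]

-- ===== VERDICT (by name: the statement is the Claim_ definition above) =====
theorem op_ed_streak2_spec : Claim_equal_op_ed_streak2 := by
  intro lst _
  unfold Spec_op_ed_streak2
  match lst with
  | [] => rfl
  | h :: t =>
    by_cases hlen : (h :: t).length < 3
    · have ht : t.length < 2 := by simp at hlen ⊢; omega
      rw [alt_eq, score_small h t ht]
      unfold op_ed_streak2
      rw [if_pos hlen]
    · rw [a_eq h t hlen, loopA_eq_score, alt_eq]
      simp
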